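-- pv_equiv track=rewrite | github.com/cymir01/CS1-25-26 | cps/cp07.py | averiguaciones
-- ===== SOURCE A (Python) =====
-- def testimonials_convertion(requested_data, testimonials):
--     output = []
--     for info in requested_data:
--         values = set()
--         for testimonial in testimonials:
--             if info in testimonial:
--                 values.add(testimonial[info])
--         output.append({info: values})
--     return output
--
-- def averiguaciones(requested_data, testimonials):
--     organized_input = testimonials_convertion(requested_data, testimonials)
--     contradictions = []
--     info_necesaria = True
--     for diccionario in organized_input:
--         for value in diccionario.values():
--             if len(value) == 0:  # error: habia puesto '== []' pero len() devuelve int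
--                 info_necesaria = False
--             if len(value) > 1:
--                 contradictions.append(value)
--     return info_necesaria, contradictions
-- ===== SOURCE B (Python) =====
-- def averiguaciones(requested_data, testimonials):
--     buckets = {info: set() for info in requested_data}
--     for testimonial in testimonials:
--         for k, v in testimonial.items():
--             if k in buckets:
--                 buckets[k].add(v)
--     info_necesaria = True
--     contradictions = []
--     for info in requested_data:
--         s = buckets[info]
--         if len(s) == 0:
--             info_necesaria = False
--         if len(s) > 1:
--             contradictions.append(s)
--     return info_necesaria, contradictions
-- ===== Notes on version B (the rewrite author's own statement) =====
-- stated objective: faster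
-- what changed: A scans the whole testimonial list once per requested key (O(R*T) dict lookups); B makes a single pass over all testimonials' items, bucketing each value into a dict of sets keyed by the requested keys, then reads each bucket once.
import Mathlib
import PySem

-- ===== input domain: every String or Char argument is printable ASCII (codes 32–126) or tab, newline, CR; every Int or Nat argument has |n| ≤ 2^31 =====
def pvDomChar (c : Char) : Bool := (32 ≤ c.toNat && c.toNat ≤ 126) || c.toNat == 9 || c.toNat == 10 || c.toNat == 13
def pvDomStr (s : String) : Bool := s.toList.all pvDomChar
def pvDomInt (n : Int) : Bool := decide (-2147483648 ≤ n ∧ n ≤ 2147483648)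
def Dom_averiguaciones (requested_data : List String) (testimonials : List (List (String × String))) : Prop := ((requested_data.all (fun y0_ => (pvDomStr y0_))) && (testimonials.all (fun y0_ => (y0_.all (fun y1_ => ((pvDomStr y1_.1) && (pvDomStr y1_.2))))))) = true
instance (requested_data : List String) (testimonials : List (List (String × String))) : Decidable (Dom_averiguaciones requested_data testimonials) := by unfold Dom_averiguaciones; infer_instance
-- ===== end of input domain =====

-- B replaces A's per-key scan of all testimonials (O(R·T)) by one pass over the
-- testimonials' items that buckets values into a dict keyed by the requested keys.

-- ===== PORT A =====
-- helper: the set of values testimonial[info] over all testimonials containing info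
-- ('info in testimonial' / 'testimonial[info]' = first-match lookup in the association list)
def pvValuesA (info : String) (testimonials : List (List (String × String))) : PySem.Set String :=
  testimonials.foldl (fun values testimonial =>
    match (PySem.Dict.mk testimonial).get? info with
    | some v => PySem.Set.add values v
    | none => values) PySem.Set.empty

def testimonials_convertion (requested_data : List String) (testimonials : List (List (String × String))) : List (String × PySem.Set String) :=
  requested_data.foldl (fun output info => output ++ [(info, pvValuesA info testimonials)]) []

def averiguaciones (requested_data : List String) (testimonials : List (List (String × String))) : Bool × List (List String) :=
  let organized_input := testimonials_convertion requested_data testimonials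
  -- each diccionario has exactly one value, so 'for value in diccionario.values()' visits pair.2
  organized_input.foldl (fun acc pair =>
    let value := pair.2
    let info_necesaria := if PySem.Set.len value = 0 then false else acc.1
    let contradictions := if 1 < PySem.Set.len value then acc.2 ++ [value] else acc.2
    (info_necesaria, contradictions)) (true, [])

-- ===== PORT B =====
def averiguaciones_alt (requested_data : List String) (testimonials : List (List (String × String))) : Bool × List (List String) :=
  let buckets0 : PySem.Dict String (PySem.Set String) :=
    requested_data.foldl (fun d info => d.insert info PySem.Set.empty) PySem.Dict.empty
  let buckets := testimonials.foldl (fun d testimonial =>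
    testimonial.foldl (fun d kv =>
      if d.contains kv.1 then d.modify kv.1 PySem.Set.empty (fun s => PySem.Set.add s kv.2) else d) d) buckets0
  requested_data.foldl (fun acc info =>
    let s := buckets.getD info PySem.Set.empty
    ((if PySem.Set.len s = 0 then false else acc.1),
     (if 1 < PySem.Set.len s then acc.2 ++ [s] else acc.2))) (true, [])

-- ===== PRECONDITION & SPEC =====
-- Pre_ excludes testimonials whose association lists repeat a key: such lists do not
-- represent any Python dict (Python collapses duplicate keys on construction), so on them
-- neither encoding's behaviour corresponds to the Python programs.
def Pre_averiguaciones (requested_data : List String) (testimonials : List (List (String × String))) : Prop :=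
  ∀ t ∈ testimonials, (t.map Prod.fst).Nodup
instance (requested_data : List String) (testimonials : List (List (String × String))) : Decidable (Pre_averiguaciones requested_data testimonials) := by unfold Pre_averiguaciones; infer_instance

def pvWitness_averiguaciones : List String × (List (List (String × String))) :=
  (["age", "city"], [[("age", "30"), ("city", "Lima")], [("age", "31")]])

def Spec_averiguaciones (requested_data : List String) (testimonials : List (List (String × String))) (out : Bool × List (List String)) : Prop := out = averiguaciones_alt requested_data testimonials
instance (requested_data : List String) (testimonials : List (List (String × String))) (out : Bool × List (List String)) : Decidable (Spec_averiguaciones requested_data testimonials out) := by unfold Spec_averiguaciones; infer_instance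

-- ===== CLAIM (what is proved, stated in full; the proofs are below) =====
def Claim_equal_averiguaciones : Prop := ∀ (requested_data : List String) (testimonials : List (List (String × String))), Dom_averiguaciones requested_data testimonials → Pre_averiguaciones requested_data testimonials → Spec_averiguaciones requested_data testimonials (averiguaciones requested_data testimonials)

-- ===== LEMMAS AND PROOFS =====

-- the per-testimonial item loop of B
def pvStepB (d : PySem.Dict String (PySem.Set String)) (kv : String × String) : PySem.Dict String (PySem.Set String) :=
  if d.contains kv.1 then d.modify kv.1 PySem.Set.empty (fun s => PySem.Set.add s kv.2) else d

theorem pvStepB_contains (t : List (String × String)) (d : PySem.Dict String (PySem.Set String)) (k : String) :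
    (t.foldl pvStepB d).contains k = d.contains k := by
  induction t generalizing d with
  | nil => rfl
  | cons kv rest ih =>
    simp only [List.foldl_cons]
    rw [ih]
    unfold pvStepB
    split_ifs with h
    · rw [PySem.Dict.contains_modify]
      by_cases hk : k = kv.1
      · subst hk; rw [h]; simp
      · simp [hk]
    · rfl

theorem pvMk_get?_none (t : List (String × String)) (k : String) (h : k ∉ t.map Prod.fst) :
    (PySem.Dict.mk t).get? k = none := by
  induction t with
  | nil => rfl
  | cons kv rest ih =>
    rw [show PySem.Dict.mk (kv :: rest) = PySem.Dict.mk ((kv.1, kv.2) :: rest) by rfl,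
        PySem.Dict.get?_mk_cons]
    simp only [List.map_cons, List.mem_cons, not_or] at h
    rw [if_neg (by simp only [beq_iff_eq]; exact fun he => h.1 he.symm)]
    exact ih h.2

theorem pvOneTestimonial (t : List (String × String)) (d : PySem.Dict String (PySem.Set String)) (k : String)
    (hk : d.contains k = true) (hnd : (t.map Prod.fst).Nodup) :
    (t.foldl pvStepB d).getD k PySem.Set.empty =
      match (PySem.Dict.mk t).get? k with
      | some v => PySem.Set.add (d.getD k PySem.Set.empty) v
      | none => d.getD k PySem.Set.empty := by
  induction t generalizing d with
  | nil => rfl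
  | cons kv rest ih =>
    simp only [List.map_cons, List.nodup_cons] at hnd
    simp only [List.foldl_cons]
    rw [show PySem.Dict.mk (kv :: rest) = PySem.Dict.mk ((kv.1, kv.2) :: rest) by rfl,
        PySem.Dict.get?_mk_cons]
    by_cases hkk : kv.1 = k
    · subst hkk
      rw [if_pos (by simp)]
      have hstep : pvStepB d kv = d.modify kv.1 PySem.Set.empty (fun s => PySem.Set.add s kv.2) := by
        unfold pvStepB; rw [if_pos hk]
      rw [hstep, ih _ (by rw [PySem.Dict.contains_modify]; simp) hnd.2,
          pvMk_get?_none rest kv.1 hnd.1]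
      simp [PySem.Dict.getD_modify_self]
    · rw [if_neg (by simpa using hkk)]
      have hcont : (pvStepB d kv).contains k = true := by
        unfold pvStepB; split_ifs with h
        · rw [PySem.Dict.contains_modify]; simp [hk]
        · exact hk
      rw [ih _ hcont hnd.2]
      have hgetD : (pvStepB d kv).getD k PySem.Set.empty = d.getD k PySem.Set.empty := by
        unfold pvStepB; split_ifs with h
        · exact PySem.Dict.getD_modify_of_ne d _ _ (fun he => hkk he.symm)
        · rfl
      rw [hgetD]

theorem pvAllTestimonials (ts : List (List (String × String))) (d : PySem.Dict String (PySem.Set String)) (k : String)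
    (hk : d.contains k = true) (hnd : ∀ t ∈ ts, (t.map Prod.fst).Nodup) :
    (ts.foldl (fun d t => t.foldl pvStepB d) d).getD k PySem.Set.empty =
      ts.foldl (fun values t =>
        match (PySem.Dict.mk t).get? k with
        | some v => PySem.Set.add values v
        | none => values) (d.getD k PySem.Set.empty) := by
  induction ts generalizing d with
  | nil => rfl
  | cons t rest ih =>
    simp only [List.foldl_cons]
    rw [ih _ (by rw [pvStepB_contains]; exact hk) (fun t' ht' => hnd t' (by simp [ht'])),
        pvOneTestimonial t d k hk (hnd t (by simp))]

theorem pvBuckets0_contains (rd : List String) (k : String) (hk : k ∈ rd) :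
    (rd.foldl (fun d info => d.insert info PySem.Set.empty) (PySem.Dict.empty : PySem.Dict String (PySem.Set String))).contains k = true := by
  rw [PySem.Dict.contains_iff_mem_keys,
      PySem.Dict.keys_foldl_insert rd (fun _ _ => PySem.Set.empty) PySem.Dict.empty]
  rw [show (PySem.Dict.empty : PySem.Dict String (PySem.Set String)).keys = [] from rfl,
      PySem.Set.update_nil_left]
  rw [PySem.Set.mem_ofList]
  exact hk

theorem pvBuckets0_getD (rd : List String) (d : PySem.Dict String (PySem.Set String)) (k : String)
    (hd : d.getD k PySem.Set.empty = PySem.Set.empty) :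
    (rd.foldl (fun d info => d.insert info PySem.Set.empty) d).getD k PySem.Set.empty = PySem.Set.empty := by
  induction rd generalizing d with
  | nil => exact hd
  | cons i rest ih =>
    simp only [List.foldl_cons]
    apply ih
    rw [PySem.Dict.getD_insert]
    split_ifs <;> [rfl; exact hd]

theorem pvBuckets_getD (rd : List String) (ts : List (List (String × String))) (k : String)
    (hk : k ∈ rd) (hnd : ∀ t ∈ ts, (t.map Prod.fst).Nodup) :
    ((ts.foldl (fun d t => t.foldl pvStepB d)
        (rd.foldl (fun d info => d.insert info PySem.Set.empty) PySem.Dict.empty)).getD k PySem.Set.empty)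
      = pvValuesA k ts := by
  rw [pvAllTestimonials _ _ _ (pvBuckets0_contains rd k hk) hnd,
      pvBuckets0_getD rd PySem.Dict.empty k rfl]
  rfl

-- ===== VERDICT (by name: the statement is the Claim_ definition above) =====
theorem averiguaciones_spec : Claim_equal_averiguaciones := by
  intro rd ts _ hpre
  unfold Spec_averiguaciones averiguaciones averiguaciones_alt testimonials_convertion
  rw [PySem.List.foldl_append_singleton_eq_map (fun info => (info, pvValuesA info ts)) rd []]
  simp only [List.nil_append, List.foldl_map]
  apply PySem.List.foldl_congr_mem
  intro acc info hinfo
  rw [show (ts.foldl (fun d t => t.foldl (fun d kv =>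
        if d.contains kv.1 then d.modify kv.1 PySem.Set.empty (fun s => PySem.Set.add s kv.2) else d) d)
        (rd.foldl (fun d info => d.insert info PySem.Set.empty) PySem.Dict.empty))
      = (ts.foldl (fun d t => t.foldl pvStepB d)
        (rd.foldl (fun d info => d.insert info PySem.Set.empty) PySem.Dict.empty)) from rfl,
      pvBuckets_getD rd ts info hinfo hpre]
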